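-- pv_equiv track=rewrite | github.com/DrBugKiller/offer | 被看到最多次的机器人.py | get_max_height
-- ===== SOURCE A (Python) =====
-- def get_max_height(n,heights):
--     max_index=0
--     max_num=0
--     for i in range(n-1):
--         val_obj=heights[i]
--         cur_num=0
--         j=i+1
--         if heights[j]<=val_obj:
--             cur_num+=1
--             j+=1
--         while j<=n-1:
--             cur_height = heights[j]
--             if i+1<j:
--                 max_height=max(heights[i+1:j])
--                 if cur_height>max_height and cur_height<=heights[i]:
--                     cur_num+=1
--                 j+=1
--             else:
--                 if cur_height<=heights[i]:
--                     cur_num += 1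
--                 j += 1
--         if cur_num>max_num:
--             max_num=cur_num
--             max_index=i
--     return heights[max_index]
-- ===== SOURCE B (Python) =====
-- def get_max_height(n, heights):
--     max_index = 0
--     max_num = 0
--     for i in range(n - 1):
--         hi = heights[i]
--         running = heights[i + 1]
--         cur = 1 if running <= hi else 0
--         for j in range(i + 2, n):
--             h = heights[j]
--             if running < h <= hi:
--                 cur += 1
--             if h > running:
--                 running = h
--         if cur > max_num:
--             max_num = cur
--             max_index = i
--     return heights[max_index]
-- ===== Notes on version B (the rewrite author's own statement) =====
-- stated objective: faster
-- what changed: The inner while-loop that recomputes max(heights[i+1:j]) from a fresh slice at every j is replaced by a single running maximum carried through one inner for-loop, removing the O(n) slice scan.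
import Mathlib
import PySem

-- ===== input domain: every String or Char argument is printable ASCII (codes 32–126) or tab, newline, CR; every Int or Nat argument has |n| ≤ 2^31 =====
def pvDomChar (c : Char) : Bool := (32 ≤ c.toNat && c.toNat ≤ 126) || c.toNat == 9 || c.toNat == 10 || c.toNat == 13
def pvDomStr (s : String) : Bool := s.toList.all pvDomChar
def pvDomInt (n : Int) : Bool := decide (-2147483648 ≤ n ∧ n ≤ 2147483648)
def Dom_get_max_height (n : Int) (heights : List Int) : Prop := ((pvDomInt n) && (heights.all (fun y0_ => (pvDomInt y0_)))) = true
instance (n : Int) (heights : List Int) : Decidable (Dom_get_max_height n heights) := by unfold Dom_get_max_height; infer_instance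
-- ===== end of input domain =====

-- B replaces A's per-j slice max(heights[i+1:j]) by one running maximum carried through the inner loop.

-- ===== PORT A =====
-- inner while-loop body: j increases by exactly 1 in both branches, so
-- 'while j <= n-1' is the fold of this step over pyRange j0 n 1
def pvAstep (heights : List Int) (i : Int) (cur_num : Int) (j : Int) : Int :=
  let cur_height := PySem.List.pyGetD heights j 0
  if i + 1 < j then
    let max_height := (PySem.List.max? (PySem.List.slice heights (some (i+1)) (some j)) (fun y => y)).getD 0
    if cur_height > max_height ∧ cur_height ≤ PySem.List.pyGetD heights i 0 then cur_num + 1 else cur_num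
  else
    if cur_height ≤ PySem.List.pyGetD heights i 0 then cur_num + 1 else cur_num

-- outer for-loop body over state (max_index, max_num)
def pvAouter (n : Int) (heights : List Int) (st : Int × Int) (i : Int) : Int × Int :=
  let val_obj := PySem.List.pyGetD heights i 0
  let start : Int × Int :=
    if PySem.List.pyGetD heights (i+1) 0 ≤ val_obj then (1, i + 2) else (0, i + 1)
  let cur_num := (PySem.List.pyRange start.2 n 1).foldl (pvAstep heights i) start.1
  if cur_num > st.2 then (i, cur_num) else st

def get_max_height (n : Int) (heights : List Int) : Int :=
  PySem.List.pyGetD heights ((PySem.List.pyRange 0 (n-1) 1).foldl (pvAouter n heights) (0, 0)).1 0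

-- ===== PORT B =====
-- inner for-loop body over state (cur, running)
def pvBstep (heights : List Int) (i : Int) (p : Int × Int) (j : Int) : Int × Int :=
  let h := PySem.List.pyGetD heights j 0
  let cur := if p.2 < h ∧ h ≤ PySem.List.pyGetD heights i 0 then p.1 + 1 else p.1
  let running := if h > p.2 then h else p.2
  (cur, running)

def pvBouter (n : Int) (heights : List Int) (st : Int × Int) (i : Int) : Int × Int :=
  let hi := PySem.List.pyGetD heights i 0
  let r0 := PySem.List.pyGetD heights (i+1) 0
  let c0 : Int := if r0 ≤ hi then 1 else 0
  let p := (PySem.List.pyRange (i+2) n 1).foldl (pvBstep heights i) (c0, r0)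
  if p.1 > st.2 then (i, p.1) else st

def get_max_height_alt (n : Int) (heights : List Int) : Int :=
  PySem.List.pyGetD heights ((PySem.List.pyRange 0 (n-1) 1).foldl (pvBouter n heights) (0, 0)).1 0

-- ===== PRECONDITION & SPEC =====
-- exactly where the Python A returns: it raises IndexError when heights = [] or n > len(heights)
def Pre_get_max_height (n : Int) (heights : List Int) : Prop :=
  heights ≠ [] ∧ n ≤ (heights.length : Int)
instance (n : Int) (heights : List Int) : Decidable (Pre_get_max_height n heights) := by
  unfold Pre_get_max_height; infer_instance
def pvWitness_get_max_height : Int × List Int := (4, [3, 1, 2, 1])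

def Spec_get_max_height (n : Int) (heights : List Int) (out : Int) : Prop := out = get_max_height_alt n heights
instance (n : Int) (heights : List Int) (out : Int) : Decidable (Spec_get_max_height n heights out) := by unfold Spec_get_max_height; infer_instance

-- ===== CLAIM (what is proved, stated in full; the proofs are below) =====
def Claim_equal_get_max_height : Prop := ∀ (n : Int) (heights : List Int), Dom_get_max_height n heights → Pre_get_max_height n heights → Spec_get_max_height n heights (get_max_height n heights)

-- ===== LEMMAS AND PROOFS =====

-- the slice heights[a:a+1] for an in-range a is the singleton [heights[a]]
lemma slice_singleton (heights : List Int) (a : Int) (h0 : 0 ≤ a)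
    (ha : a < (heights.length : Int)) :
    PySem.List.slice heights (some a) (some (a+1)) = [heights[a.toNat]'(by omega)] := by
  rw [PySem.List.slice_toNat heights h0 (by omega)]
  have h1 : (a+1).toNat - a.toNat = 1 := by omega
  have hd : a.toNat < heights.length := by omega
  rw [h1, List.take_add_one, List.take_zero, List.nil_append, List.getElem?_drop]
  simp [List.getElem?_eq_getElem hd]

-- base of the invariant: max(heights[a:a+1]) = heights[a]
lemma maxSlice_base (heights : List Int) (a : Int) (h0 : 0 ≤ a)
    (ha : a < (heights.length : Int)) :
    (PySem.List.max? (PySem.List.slice heights (some a) (some (a+1))) (fun y => y)).getD 0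
      = PySem.List.pyGetD heights a 0 := by
  rw [slice_singleton heights a h0 ha, PySem.List.max?_id_cons]
  simp [PySem.List.pyGetD_eq_getElem heights 0 h0 ha]

-- stepping the slice max: max(heights[a:j+1]) = max(max(heights[a:j]), heights[j])
lemma maxSlice_step (heights : List Int) (a j : Int) (h0 : 0 ≤ a) (haj : a < j)
    (hj : j < (heights.length : Int)) :
    (PySem.List.max? (PySem.List.slice heights (some a) (some (j+1))) (fun y => y)).getD 0
      = max ((PySem.List.max? (PySem.List.slice heights (some a) (some j)) (fun y => y)).getD 0)
            (PySem.List.pyGetD heights j 0) := by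
  have h0j : (0:Int) ≤ j := by omega
  rw [PySem.List.slice_toNat heights h0 (by omega), PySem.List.slice_toNat heights h0 h0j]
  have hdne : heights.drop a.toNat ≠ [] := by
    apply List.ne_nil_of_length_pos
    rw [List.length_drop]; omega
  obtain ⟨x, t, hxt⟩ := List.exists_cons_of_ne_nil hdne
  have htlen : t.length = heights.length - a.toNat - 1 := by
    have := congrArg List.length hxt
    simp [List.length_drop] at this; omega
  have hm' : j.toNat - a.toNat - 1 < t.length := by omega
  have h1 : (j+1).toNat - a.toNat = (j.toNat - a.toNat - 1) + 1 + 1 := by omega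
  have h2 : j.toNat - a.toNat = (j.toNat - a.toNat - 1) + 1 := by omega
  rw [h1, h2, hxt, List.take_succ_cons, List.take_succ_cons, List.take_add_one]
  simp only [Nat.add_sub_cancel]
  rw [List.getElem?_eq_getElem hm']
  simp only [Option.toList_some]
  rw [PySem.List.max?_id_cons, PySem.List.max?_id_cons, List.foldl_append]
  simp only [List.foldl_cons, List.foldl_nil, Option.getD_some]
  congr 1
  have hjlen : j.toNat < heights.length := by omega
  have ht : t[j.toNat - a.toNat - 1] = heights[j.toNat]'hjlen := by
    have hgd : (heights.drop a.toNat)[(j.toNat - a.toNat - 1) + 1]? = heights[j.toNat]? := by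
      rw [List.getElem?_drop]
      congr 1; omega
    rw [hxt] at hgd
    simp [List.getElem?_cons_succ, List.getElem?_eq_getElem hm',
          List.getElem?_eq_getElem hjlen] at hgd
    exact hgd
  rw [ht, PySem.List.pyGetD_eq_getElem heights 0 h0j hj]

-- inner loops agree: A's fold recomputing the slice max equals B's fold carrying it
lemma inner_eq (heights : List Int) (n i : Int) (hlen : n ≤ (heights.length : Int))
    (hi0 : 0 ≤ i) :
    ∀ (k : Nat) (j0 cur run : Int), (n - j0).toNat = k → i + 2 ≤ j0 →
      run = (PySem.List.max? (PySem.List.slice heights (some (i+1)) (some j0)) (fun y => y)).getD 0 →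
      (PySem.List.pyRange j0 n 1).foldl (pvAstep heights i) cur
        = ((PySem.List.pyRange j0 n 1).foldl (pvBstep heights i) (cur, run)).1 := by
  intro k
  induction k with
  | zero =>
    intro j0 cur run hk h2 hrun
    rw [PySem.List.pyRange_one_eq_nil (by omega : n ≤ j0)]
    simp
  | succ k ih =>
    intro j0 cur run hk h2 hrun
    have hlt : j0 < n := by omega
    rw [PySem.List.pyRange_one_cons hlt]
    simp only [List.foldl_cons]
    have hB : pvBstep heights i (cur, run) j0 =
        (pvAstep heights i cur j0,
         if run < PySem.List.pyGetD heights j0 0 then PySem.List.pyGetD heights j0 0 else run) := by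
      simp only [pvAstep, pvBstep, ← hrun, if_pos (show i + 1 < j0 by omega)]
    rw [hB]
    refine ih (j0+1) _ _ (by omega) (by omega) ?_
    rw [maxSlice_step heights (i+1) j0 (by omega) (by omega) (by omega), ← hrun,
        Int.max_def]
    split_ifs <;> omega

-- the outer bodies agree for every i the outer loop visits
lemma outer_eq (n : Int) (heights : List Int) (hlen : n ≤ (heights.length : Int))
    (st : Int × Int) (i : Int) (hi : i ∈ PySem.List.pyRange 0 (n-1) 1) :
    pvAouter n heights st i = pvBouter n heights st i := by
  rw [PySem.List.mem_pyRange_one] at hi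
  obtain ⟨h0, h1⟩ := hi
  have hinext : i + 1 < (heights.length : Int) := by omega
  have hbase := maxSlice_base heights (i+1) (by omega) hinext
  rw [show (i:Int) + 1 + 1 = i + 2 by ring] at hbase
  unfold pvAouter pvBouter
  by_cases hc : PySem.List.pyGetD heights (i+1) 0 ≤ PySem.List.pyGetD heights i 0
  · simp only [if_pos hc]
    rw [inner_eq heights n i hlen h0 (n - (i+2)).toNat (i+2) 1
          (PySem.List.pyGetD heights (i+1) 0) rfl (by omega) hbase.symm]
  · simp only [if_neg hc]
    rw [PySem.List.pyRange_one_cons (show i + 1 < n by omega)]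
    simp only [List.foldl_cons]
    have hA0 : pvAstep heights i 0 (i+1) = 0 := by
      simp only [pvAstep, if_neg (show ¬ (i + 1 < i + 1) by omega), if_neg hc]
    rw [hA0, show (i:Int) + 1 + 1 = i + 2 by ring, inner_eq heights n i hlen h0 (n - (i+2)).toNat (i+2) 0
          (PySem.List.pyGetD heights (i+1) 0) rfl (by omega) hbase.symm]

-- ===== VERDICT (by name: the statement is the Claim_ definition above) =====
theorem get_max_height_spec : Claim_equal_get_max_height := by
  intro n heights _ hpre
  obtain ⟨_, hlen⟩ := hpre
  unfold Spec_get_max_height get_max_height get_max_height_alt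
  rw [PySem.List.foldl_congr_mem (PySem.List.pyRange 0 (n-1) 1)
        (pvAouter n heights) (pvBouter n heights) (0, 0)
        (fun st x hx => outer_eq n heights hlen st x hx)]
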